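-- pv_equiv track=rewrite | github.com/sjrgame/shijingrong | Protocol/dl645.py | FieldParsing645_202
-- ===== SOURCE A (Python) =====
-- def FieldParsing645_202(data):
--     if len(data) != 4:
--         return 'Cannot Parse The data: '+data
--     TempStrValue = ''
--     for i in range(len(data)-1, -1, -2):
--         TempStrValue +=data[i-1]
--         TempStrValue +=data[i]
--
--     strValue = ''
--     for i in range(0,len(TempStrValue), 1):
--         if i == 2:
--             strValue = strValue + '.'
--         strValue =strValue + TempStrValue[i]
--     return strValue
-- ===== SOURCE B (Python) =====
-- def FieldParsing645_202(data):
--     # B: closed form via slicing -- no loops; same guard and message as A.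
--     if len(data) != 4:
--         return 'Cannot Parse The data: ' + data
--     return data[2:4] + '.' + data[0:2]
-- ===== Notes on version B (the rewrite author's own statement) =====
-- stated objective: simpler
-- what changed: Replaces A's two accumulator loops (byte-pair reversal then dot insertion) with a single closed-form concatenation of two slices around the decimal point.
import Mathlib
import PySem

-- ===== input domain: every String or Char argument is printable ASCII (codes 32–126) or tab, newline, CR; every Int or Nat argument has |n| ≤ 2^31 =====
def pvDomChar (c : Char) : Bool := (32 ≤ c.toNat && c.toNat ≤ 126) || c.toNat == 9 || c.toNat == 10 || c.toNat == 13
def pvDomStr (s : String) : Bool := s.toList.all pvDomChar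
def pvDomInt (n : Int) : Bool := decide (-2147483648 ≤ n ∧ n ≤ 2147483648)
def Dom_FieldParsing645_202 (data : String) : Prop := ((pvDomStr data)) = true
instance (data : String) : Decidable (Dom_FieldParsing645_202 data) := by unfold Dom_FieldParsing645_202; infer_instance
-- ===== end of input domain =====

-- B replaces A's two accumulator loops with one closed-form slice expression (same guard and message).
-- ===== PORT A =====
def FieldParsing645_202 (data : String) : String :=
  let cs := data.toList
  if cs.length ≠ 4 then
    String.ofList ("Cannot Parse The data: ".toList ++ cs)
  else
    -- TempStrValue accumulated over range(len(data)-1, -1, -2)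
    let temp := (PySem.List.pyRange ((cs.length : Int) - 1) (-1) (-2)).foldl
      (fun acc i =>
        (acc ++ (PySem.List.pyGet? cs (i - 1)).elim [] (fun ch => [ch]))
          ++ (PySem.List.pyGet? cs i).elim [] (fun ch => [ch])) []
    -- strValue accumulated over range(0, len(TempStrValue), 1), '.' inserted at i == 2
    let sv := (PySem.List.pyRange 0 ((temp.length : Int)) 1).foldl
      (fun acc i =>
        (if i = 2 then acc ++ ['.'] else acc)
          ++ (PySem.List.pyGet? temp i).elim [] (fun ch => [ch])) []
    String.ofList sv

-- ===== PORT B =====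
def FieldParsing645_202_alt (data : String) : String :=
  let cs := data.toList
  if cs.length ≠ 4 then
    String.ofList ("Cannot Parse The data: ".toList ++ cs)
  else
    String.ofList (PySem.List.slice cs (some 2) (some 4) ++ ['.'] ++ PySem.List.slice cs (some 0) (some 2))

-- ===== PRECONDITION & SPEC =====
def Spec_FieldParsing645_202 (data : String) (out : String) : Prop := out = FieldParsing645_202_alt data
instance (data : String) (out : String) : Decidable (Spec_FieldParsing645_202 data out) := by unfold Spec_FieldParsing645_202; infer_instance

-- ===== CLAIM (what is proved, stated in full; the proofs are below) =====
def Claim_equal_FieldParsing645_202 : Prop := ∀ (data : String), Dom_FieldParsing645_202 data → Spec_FieldParsing645_202 data (FieldParsing645_202 data)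

-- ===== LEMMAS AND PROOFS =====

-- ===== VERDICT (by name: the statement is the Claim_ definition above) =====
theorem FieldParsing645_202_spec : Claim_equal_FieldParsing645_202 := by
  intro data _
  unfold Spec_FieldParsing645_202 FieldParsing645_202 FieldParsing645_202_alt
  generalize data.toList = l
  by_cases h : l.length = 4
  · match l, h with
    | [a, b, c, d], _ =>
      dsimp only
      rw [if_neg (by simp), if_neg (by simp)]
      rw [show ((([a,b,c,d]:List Char).length : Int) - 1) = 3 by norm_num]
      rw [show PySem.List.pyRange (3:Int) (-1) (-2) = [3,1] from by decide]
      simp only [List.foldl_cons, List.foldl_nil]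
      norm_num [PySem.List.pyGet?, PySem.List.pyIdx?, PySem.List.slice, PySem.List.clampIdx]
      rw [show PySem.List.pyRange 0 (4:Int) 1 = [0,1,2,3] from by decide]
      simp [← String.ofList_append]
  · rw [if_pos h, if_pos h]
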